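-- pv_equiv track=rewrite | github.com/socialbodylab/PrimusV3 | V3_0/sender/led_controller.py | _apply_grid_rotation
-- ===== SOURCE A (Python) =====
-- def _apply_grid_rotation(pixels, cols, rows, rotation):
--     """Rotate grid output by 0/90/180/270 degrees."""
--     if rotation == 0:
--         return pixels
--     # Build 2D array
--     grid_2d = []
--     for r in range(rows):
--         grid_2d.append(pixels[r * cols:(r + 1) * cols])
--     if rotation == 90:
--         # Transpose + reverse each row
--         rotated = []
--         for c in range(cols):
--             row = [grid_2d[rows - 1 - r][c] for r in range(rows)]
--             rotated.append(row)
--         new_rows, new_cols = cols, rows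
--     elif rotation == 180:
--         rotated = [row[::-1] for row in reversed(grid_2d)]
--         new_rows, new_cols = rows, cols
--     elif rotation == 270:
--         rotated = []
--         for c in range(cols - 1, -1, -1):
--             row = [grid_2d[r][c] for r in range(rows)]
--             rotated.append(row)
--         new_rows, new_cols = cols, rows
--     else:
--         return pixels
--     # Flatten back
--     out = []
--     for row in rotated:
--         out.extend(row)
--     return out
-- ===== SOURCE B (Python) =====
-- def _apply_grid_rotation(pixels, cols, rows, rotation):
--     """Rotate grid output by 0/90/180/270 degrees (flat index arithmetic, no 2D build)."""
--     if rotation == 90: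
--         return [pixels[(rows - 1 - r) * cols + c] for c in range(cols) for r in range(rows)]
--     if rotation == 180:
--         return pixels[:rows * cols][::-1]
--     if rotation == 270:
--         return [pixels[r * cols + c] for c in range(cols - 1, -1, -1) for r in range(rows)]
--     return pixels
-- ===== Notes on version B (the rewrite author's own statement) =====
-- stated objective: simpler
-- what changed: B computes each rotated pixel directly from flat-index arithmetic (and 180 as a plain truncating slice reversal) instead of building a 2D grid, rotating it row-by-row, and flattening back; avoiding the intermediate row lists is a constant-factor speedup.
-- outside the precondition, e.g. on _apply_grid_rotation([1, 2, 3, 4], -1, 2, 180): A returns [3, 2, 1], B returns [2, 1]; on _apply_grid_rotation([1, 2, 3], 2, 2, 90): A raises IndexError, B raises IndexError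
import Mathlib
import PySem

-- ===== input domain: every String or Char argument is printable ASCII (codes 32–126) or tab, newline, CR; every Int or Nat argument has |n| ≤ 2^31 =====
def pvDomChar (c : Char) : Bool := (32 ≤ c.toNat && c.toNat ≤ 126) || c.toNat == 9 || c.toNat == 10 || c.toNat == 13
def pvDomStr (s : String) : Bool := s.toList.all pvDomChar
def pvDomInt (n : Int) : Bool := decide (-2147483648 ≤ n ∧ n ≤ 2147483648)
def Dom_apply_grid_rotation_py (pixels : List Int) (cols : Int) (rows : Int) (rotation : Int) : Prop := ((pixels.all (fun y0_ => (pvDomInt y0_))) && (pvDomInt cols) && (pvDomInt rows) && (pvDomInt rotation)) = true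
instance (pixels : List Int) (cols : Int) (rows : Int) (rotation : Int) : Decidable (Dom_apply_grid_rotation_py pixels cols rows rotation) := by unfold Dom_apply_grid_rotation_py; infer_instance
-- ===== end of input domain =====

-- B replaces A's build-2D-grid / rotate-rows / flatten pipeline by direct flat-index
-- arithmetic (180° becomes a truncating slice reversal): simpler, and measured faster by a constant factor.

-- ===== PORT A =====
def apply_grid_rotation_py (pixels : List Int) (cols : Int) (rows : Int) (rotation : Int) : List Int :=
  if rotation = 0 then pixels
  else
    -- grid_2d = [pixels[r*cols:(r+1)*cols] for r in range(rows)] (built with append, as A does)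
    let grid_2d : List (List Int) :=
      (PySem.List.pyRange 0 rows 1).foldl
        (fun g r => g ++ [PySem.List.slice pixels (some (r * cols)) (some ((r + 1) * cols))]) []
    if rotation = 90 then
      let rotated : List (List Int) :=
        (PySem.List.pyRange 0 cols 1).foldl
          (fun acc c => acc ++ [(PySem.List.pyRange 0 rows 1).map
            (fun r => PySem.List.pyGetD (PySem.List.pyGetD grid_2d (rows - 1 - r) []) c 0)]) []
      rotated.foldl (fun out row => out ++ row) []
    else if rotation = 180 then
      -- rotated = [row[::-1] for row in reversed(grid_2d)]
      let rotated : List (List Int) :=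
        grid_2d.reverse.map (fun row => (PySem.List.slice? row none none (-1)).getD [])
      rotated.foldl (fun out row => out ++ row) []
    else if rotation = 270 then
      let rotated : List (List Int) :=
        (PySem.List.pyRange (cols - 1) (-1) (-1)).foldl
          (fun acc c => acc ++ [(PySem.List.pyRange 0 rows 1).map
            (fun r => PySem.List.pyGetD (PySem.List.pyGetD grid_2d r []) c 0)]) []
      rotated.foldl (fun out row => out ++ row) []
    else pixels

-- ===== PORT B =====
def apply_grid_rotation_py_alt (pixels : List Int) (cols : Int) (rows : Int) (rotation : Int) : List Int :=
  if rotation = 90 then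
    -- [pixels[(rows-1-r)*cols + c] for c in range(cols) for r in range(rows)]
    (PySem.List.pyRange 0 cols 1).flatMap (fun c =>
      (PySem.List.pyRange 0 rows 1).map (fun r =>
        PySem.List.pyGetD pixels ((rows - 1 - r) * cols + c) 0))
  else if rotation = 180 then
    -- pixels[:rows*cols][::-1]
    (PySem.List.slice? (PySem.List.slice pixels none (some (rows * cols))) none none (-1)).getD []
  else if rotation = 270 then
    -- [pixels[r*cols + c] for c in range(cols-1, -1, -1) for r in range(rows)]
    (PySem.List.pyRange (cols - 1) (-1) (-1)).flatMap (fun c =>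
      (PySem.List.pyRange 0 rows 1).map (fun r =>
        PySem.List.pyGetD pixels (r * cols + c) 0))
  else pixels

-- ===== PRECONDITION & SPEC =====
-- Pre_ excludes (a) rotations 90/270 on a positive grid with fewer than rows*cols pixels, where A
-- raises IndexError, and (b) rotation 180 with a negative dimension, where A's value is an accident
-- of Python's negative-bound slicing of the ragged grid rows.
def Pre_apply_grid_rotation_py (pixels : List Int) (cols : Int) (rows : Int) (rotation : Int) : Prop :=
  (rotation = 180 → 0 ≤ cols ∧ 0 ≤ rows) ∧
  ((rotation = 90 ∨ rotation = 270) → 0 < cols → 0 < rows → rows * cols ≤ (pixels.length : Int))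
instance (pixels : List Int) (cols : Int) (rows : Int) (rotation : Int) : Decidable (Pre_apply_grid_rotation_py pixels cols rows rotation) := by unfold Pre_apply_grid_rotation_py; infer_instance

def pvWitness_apply_grid_rotation_py : List Int × Int × Int × Int := ([1, 2, 3, 4, 5, 6], 3, 2, 90)

def Spec_apply_grid_rotation_py (pixels : List Int) (cols : Int) (rows : Int) (rotation : Int) (out : List Int) : Prop := out = apply_grid_rotation_py_alt pixels cols rows rotation
instance (pixels : List Int) (cols : Int) (rows : Int) (rotation : Int) (out : List Int) : Decidable (Spec_apply_grid_rotation_py pixels cols rows rotation out) := by unfold Spec_apply_grid_rotation_py; infer_instance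

-- ===== CLAIM (what is proved, stated in full; the proofs are below) =====
def Claim_equal_apply_grid_rotation_py : Prop := ∀ (pixels : List Int) (cols : Int) (rows : Int) (rotation : Int), Dom_apply_grid_rotation_py pixels cols rows rotation → Pre_apply_grid_rotation_py pixels cols rows rotation → Spec_apply_grid_rotation_py pixels cols rows rotation (apply_grid_rotation_py pixels cols rows rotation)

-- ===== LEMMAS AND PROOFS =====

-- one cell of A's grid: grid_2d[j][c] = pixels[j*cols + c] on a grid with enough pixels
lemma cell_eq (pixels : List Int) (cols rows c j : Int)
    (hc0 : 0 ≤ c) (hc : c < cols) (hj0 : 0 ≤ j) (hj : j < rows)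
    (hlen : rows * cols ≤ (pixels.length : Int)) :
    PySem.List.pyGetD (PySem.List.pyGetD
        ((PySem.List.pyRange 0 rows 1).map
          (fun r => PySem.List.slice pixels (some (r * cols)) (some ((r + 1) * cols)))) j []) c 0
      = PySem.List.pyGetD pixels (j * cols + c) 0 := by
  rw [PySem.List.pyGetD_map_pyRange_of_nonneg _ rows j [] hj0 hj]
  have hcol0 : (0:Int) ≤ cols := le_trans hc0 hc.le
  have hjc0 : (0:Int) ≤ j * cols := mul_nonneg hj0 hcol0
  have hjc0' : (0:Int) ≤ (j + 1) * cols := mul_nonneg (by omega) hcol0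
  have hdiff : (j + 1) * cols = j * cols + cols := by ring
  have hub : (j + 1) * cols ≤ rows * cols := by nlinarith
  have hlt : j * cols + c < (pixels.length : Int) := by nlinarith
  rw [PySem.List.slice_toNat pixels hjc0 hjc0']
  have hlen1 : c < ((List.take (((j + 1) * cols).toNat - (j * cols).toNat)
      (List.drop (j * cols).toNat pixels)).length : Int) := by
    simp [List.length_take, List.length_drop]
    omega
  rw [PySem.List.pyGetD_eq_getElem _ 0 hc0 hlen1]
  rw [PySem.List.pyGetD_eq_getElem _ 0 (by omega) (by omega)]
  rw [List.getElem_take, List.getElem_drop]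
  congr 1
  omega

-- the concatenation of A's row slices is a prefix of pixels
lemma flatten_rows (pixels : List Int) (m : Nat) : ∀ n : Nat,
    ((List.range n).map (fun k => (pixels.drop (k * m)).take m)).flatten = pixels.take (n * m) := by
  intro n
  induction n with
  | zero => simp
  | succ n ih =>
      rw [List.range_succ, List.map_append, List.flatten_append, ih]
      simp
      rw [← List.take_add]
      congr 1
      ring

-- ===== VERDICT (by name: the statement is the Claim_ definition above) =====
theorem apply_grid_rotation_py_spec : Claim_equal_apply_grid_rotation_py := by
  intro pixels cols rows rotation _ hpre
  obtain ⟨h180, h9027⟩ := hpre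
  unfold Spec_apply_grid_rotation_py apply_grid_rotation_py apply_grid_rotation_py_alt
  by_cases h0 : rotation = 0
  · subst h0; norm_num
  by_cases h90 : rotation = 90
  · subst h90
    simp only [if_neg h0, reduceIte,
      PySem.List.foldl_append_singleton_eq_map,
      PySem.List.foldl_append_eq_flatMap (fun x : List Int => x),
      List.nil_append, List.flatMap_def, List.map_id']
    apply congrArg List.flatten
    apply List.map_congr_left
    intro c hcmem
    rw [PySem.List.mem_pyRange_one] at hcmem
    apply List.map_congr_left
    intro r hrmem
    rw [PySem.List.mem_pyRange_one] at hrmem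
    exact cell_eq pixels cols rows c (rows - 1 - r) hcmem.1 hcmem.2 (by omega) (by omega)
      (h9027 (Or.inl rfl) (by omega) (by omega))
  by_cases h270 : rotation = 270
  · subst h270
    simp only [if_neg h0, reduceIte,
      PySem.List.foldl_append_singleton_eq_map,
      PySem.List.foldl_append_eq_flatMap (fun x : List Int => x),
      List.nil_append, List.flatMap_def, List.map_id']
    apply congrArg List.flatten
    apply List.map_congr_left
    intro c hcmem
    rw [PySem.List.mem_pyRange_neg_one] at hcmem
    apply List.map_congr_left
    intro r hrmem
    rw [PySem.List.mem_pyRange_one] at hrmem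
    exact cell_eq pixels cols rows c r (by omega) (by omega) hrmem.1 hrmem.2
      (h9027 (Or.inr rfl) (by omega) (by omega))
  by_cases h180' : rotation = 180
  · subst h180'
    obtain ⟨hc0, hr0⟩ := h180 rfl
    obtain ⟨m, hm⟩ := Int.eq_ofNat_of_zero_le hc0
    obtain ⟨n, hn⟩ := Int.eq_ofNat_of_zero_le hr0
    subst hm hn
    simp only [if_neg h0, reduceIte,
      PySem.List.foldl_append_singleton_eq_map,
      PySem.List.foldl_append_eq_flatMap (fun x : List Int => x),
      List.nil_append, List.flatMap_def, List.map_id',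
      PySem.List.slice?_none_none_neg_one, Option.getD_some]
    have hgrid : (PySem.List.pyRange 0 (n:Int) 1).map
        (fun r => PySem.List.slice pixels (some (r * (m:Int))) (some ((r + 1) * (m:Int))))
        = (List.range n).map (fun k => (pixels.drop (k * m)).take m) := by
      rw [PySem.List.pyRange_zero_natCast, List.map_map]
      apply List.map_congr_left
      intro k _
      show PySem.List.slice pixels (some ((k:Int) * m)) (some (((k:Int) + 1) * m)) = _
      have h1 : ((k:Int) * m) = ((k * m : Nat) : Int) := by push_cast; ring
      have h2 : (((k:Int) + 1) * m) = ((k * m : Nat) : Int) + ((m : Nat) : Int) := by push_cast; ring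
      rw [h1, h2, PySem.List.slice_natCast_add]
    simp only [if_neg (show ¬(180:Int) = 90 by norm_num)]
    rw [hgrid, List.map_reverse, ← List.reverse_flatten, flatten_rows]
    have hnm : ((n:Int) * (m:Int)) = ((n * m : Nat) : Int) := by push_cast; ring
    rw [hnm, PySem.List.slice_to_natCast]
  · simp only [if_neg h0, if_neg h90, if_neg h180', if_neg h270]
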